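-- pv_equiv track=rewrite | github.com/mfascia/Kryptos | kk.py | raised_letters_contract
-- ===== SOURCE A (Python) =====
-- def raised_letters_contract(text):
-- 	# 0123456
-- 	# endYAhR
-- 	contracted = ""
-- 	i = 0
-- 	while i < len(text):
-- 		if i % 7 not in [3, 4, 6]:
-- 		# if i % 7 not in [0, 1, 2, 5]:
-- 			contracted += text[i]
-- 		i += 1
-- 	return contracted
-- ===== SOURCE B (Python) =====
-- def raised_letters_contract(text):
--     # Chunked rewrite: keep positions 0,1,2,5 of every 7-char block via slices.
--     pieces = []
--     for j in range(0, len(text), 7):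
--         pieces.append(text[j:j+3])
--         pieces.append(text[j+5:j+6])
--     return "".join(pieces)
-- ===== Notes on version B (the rewrite author's own statement) =====
-- stated objective: faster
-- what changed: Replaces the per-character while loop testing i % 7 against [3,4,6] (with repeated string += concatenation) by chunked processing: slice positions 0-2 and 5 out of each 7-character block and join the pieces once.
import Mathlib
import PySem

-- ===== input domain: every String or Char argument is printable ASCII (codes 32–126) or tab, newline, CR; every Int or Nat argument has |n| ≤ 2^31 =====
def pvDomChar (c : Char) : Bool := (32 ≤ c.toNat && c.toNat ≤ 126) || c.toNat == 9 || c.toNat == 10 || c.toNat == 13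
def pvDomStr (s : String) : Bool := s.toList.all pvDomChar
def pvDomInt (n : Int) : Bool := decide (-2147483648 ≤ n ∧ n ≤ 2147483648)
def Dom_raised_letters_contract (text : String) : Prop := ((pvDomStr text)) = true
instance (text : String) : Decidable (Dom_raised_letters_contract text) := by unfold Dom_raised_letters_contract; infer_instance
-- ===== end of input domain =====

-- B processes the text in chunks of 7 via slices (keep positions 0,1,2,5 of each block)
-- instead of A's per-character i % 7 test and repeated += ; measured faster at large sizes.

-- ===== PORT A =====
-- while i < len(text): if i % 7 not in [3,4,6]: contracted += text[i]; i += 1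
def pvGoA (cs : List Char) (i : Nat) (acc : List Char) : List Char :=
  if h : i < cs.length then
    pvGoA cs (i + 1) (if (i % 7) ∈ [3, 4, 6] then acc else acc ++ [cs[i]])
  else acc
termination_by cs.length - i
decreasing_by omega

def raised_letters_contract (text : String) : String :=
  String.ofList (pvGoA text.toList 0 [])

-- ===== PORT B =====
-- for j in range(0, len(text), 7): pieces += [text[j:j+3], text[j+5:j+6]]; "".join(pieces)
def pvGoB (cs : List Char) (j : Nat) : List Char :=
  if j < cs.length then
    PySem.List.slice cs (some (j : Int)) (some ((j : Int) + 3))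
      ++ PySem.List.slice cs (some ((j : Int) + 5)) (some ((j : Int) + 6))
      ++ pvGoB cs (j + 7)
  else []
termination_by cs.length - j
decreasing_by omega

def raised_letters_contract_alt (text : String) : String :=
  String.ofList (pvGoB text.toList 0)

-- ===== PRECONDITION & SPEC =====
def Spec_raised_letters_contract (text : String) (out : String) : Prop := out = raised_letters_contract_alt text
instance (text : String) (out : String) : Decidable (Spec_raised_letters_contract text out) := by unfold Spec_raised_letters_contract; infer_instance

-- ===== CLAIM (what is proved, stated in full; the proofs are below) =====
def Claim_equal_raised_letters_contract : Prop := ∀ (text : String), Dom_raised_letters_contract text → Spec_raised_letters_contract text (raised_letters_contract text)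

-- ===== LEMMAS AND PROOFS =====

-- Structural version of A's loop on the remaining characters, tracking i % 7.
def pvGoS (r : Nat) (l : List Char) : List Char :=
  match l with
  | [] => []
  | c :: t => (if r ∈ [3, 4, 6] then [] else [c]) ++ pvGoS ((r + 1) % 7) t

theorem pvGoA_eq_goS (cs : List Char) (i : Nat) (acc : List Char) (h : i ≤ cs.length) :
    pvGoA cs i acc = acc ++ pvGoS (i % 7) (cs.drop i) := by
  induction hm : cs.length - i generalizing i acc with
  | zero =>
      have hi : i = cs.length := by omega
      rw [pvGoA]
      simp [hi, pvGoS]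
  | succ m ih =>
      have hi : i < cs.length := by omega
      rw [pvGoA, dif_pos hi]
      have hdrop : cs.drop i = cs[i] :: cs.drop (i + 1) := List.drop_eq_getElem_cons hi
      have hmod : (i + 1) % 7 = (i % 7 + 1) % 7 := by omega
      rw [ih (i + 1) _ (by omega) (by omega)]
      simp only [hdrop, pvGoS, hmod]
      split <;> simp

-- One block of B's recursion, expressed on the remaining characters.
theorem pvGoS_block (l : List Char) (hl : l ≠ []) :
    pvGoS 0 l = l.take 3 ++ (l.drop 5).take 1 ++ pvGoS 0 (l.drop 7) := by
  rcases l with _ | ⟨a, _ | ⟨b, _ | ⟨c, _ | ⟨d, _ | ⟨e, _ | ⟨f, _ | ⟨g, t⟩⟩⟩⟩⟩⟩⟩ <;>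
    simp [pvGoS]

theorem pvGoB_eq_goS (cs : List Char) (j : Nat) :
    pvGoB cs j = pvGoS 0 (cs.drop j) := by
  induction hm : cs.length - j using Nat.strong_induction_on generalizing j with
  | _ m ih =>
    rw [pvGoB]
    by_cases hj : j < cs.length
    · have h1 : PySem.List.slice cs (some (j : Int)) ((some ((j : Int) + 3))) = (cs.drop j).take 3 := by
        have := PySem.List.slice_natCast_add cs j 3
        simpa using this
      have h2 : PySem.List.slice cs (some ((j : Int) + 5)) ((some ((j : Int) + 6))) = ((cs.drop j).drop 5).take 1 := by
        have := PySem.List.slice_natCast_add cs (j + 5) 1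
        push_cast at this
        rw [show (j : Int) + 6 = (j : Int) + 5 + 1 by ring]
        simpa [List.drop_drop, Nat.add_comm] using this
      rw [if_pos hj, h1, h2, ih (cs.length - (j + 7)) (by omega) (j + 7) rfl]
      rw [pvGoS_block (cs.drop j) (by simp; omega)]
      simp [List.drop_drop]
    · rw [if_neg hj]
      rw [List.drop_eq_nil_of_le (by omega)]
      rfl

-- ===== VERDICT (by name: the statement is the Claim_ definition above) =====
theorem raised_letters_contract_spec : Claim_equal_raised_letters_contract := by
  intro text _
  unfold Spec_raised_letters_contract raised_letters_contract raised_letters_contract_alt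
  rw [pvGoA_eq_goS _ 0 [] (by omega), pvGoB_eq_goS]
  simp
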